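-- pv_equiv track=rewrite | github.com/pypi-data/pypi-mirror-116 | packages/cisco-documentation/cisco_documentation-0.0.2-py2.py3-none-any.whl/cisco_documentation/cli.py | split_interface
-- ===== SOURCE A (Python) =====
-- def split_interface(interface):
--     try:
--         num_index = interface.index(next(x for x in interface if x.isdigit()))
--         str_part = interface[:num_index]
--         num_part = interface[num_index:]
--     except StopIteration:
--         return ['', '']
--     return [str_part, num_part]
-- ===== SOURCE B (Python) =====
-- import re
--
-- # Regex: greedy non-digit prefix, then from the first digit to the end.
-- # re.DOTALL so '.*' spans newlines, matching A's slice-to-end behaviour.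
-- _SPLIT_PAT = re.compile(r'(\D*)(\d.*)', re.DOTALL)
--
--
-- def split_interface(interface):
--     m = _SPLIT_PAT.match(interface)
--     if m is None:
--         return ['', '']
--     return [m.group(1), m.group(2)]
-- ===== Notes on version B (the rewrite author's own statement) =====
-- stated objective: idiomatic
-- what changed: B replaces A's first-digit generator + .index() rescan + slicing with a single compiled regex match r'(\D*)(\d.*)' (DOTALL) whose two groups are the alpha prefix and digit-onward suffix.
import Mathlib
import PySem

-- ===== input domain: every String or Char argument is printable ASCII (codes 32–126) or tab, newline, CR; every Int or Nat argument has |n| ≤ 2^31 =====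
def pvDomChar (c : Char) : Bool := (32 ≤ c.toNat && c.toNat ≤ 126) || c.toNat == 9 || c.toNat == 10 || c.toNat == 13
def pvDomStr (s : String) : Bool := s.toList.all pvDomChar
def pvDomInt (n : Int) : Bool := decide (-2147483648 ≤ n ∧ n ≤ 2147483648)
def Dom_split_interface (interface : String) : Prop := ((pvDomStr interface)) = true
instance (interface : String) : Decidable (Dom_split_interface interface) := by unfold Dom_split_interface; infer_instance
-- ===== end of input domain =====

-- B replaces A's first-digit generator + .index() rescan with one regex match r'(\D*)(\d.*)' (DOTALL); more idiomatic, same result.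

-- ===== PORT A =====
def split_interface (interface : String) : List String :=
  match interface.toList.find? (fun x => PySem.Chars.isdigit x) with
  | none => ["", ""]                                   -- except StopIteration
  | some x =>
      -- interface.index(x): x is a character of interface, so str.index = str.find here (no ValueError)
      let numIndex : Int := PySem.Str.find interface (String.ofList [x])
      let strPart := PySem.Str.slice interface none (some numIndex)
      let numPart := PySem.Str.slice interface (some numIndex) none
      [strPart, numPart]

-- ===== PORT B =====
-- Hand port of the regex match of r'(\D*)(\d.*)' with re.DOTALL (PySem has no regex engine);
-- exact for this pattern: group 1 = '\D*' = the maximal non-digit prefix, then '\d.*' requires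
-- the remainder to start with a digit and group 2 takes it whole ('.' spans newlines under DOTALL);
-- if the remainder is empty the pattern fails to match (m is None) and B returns ['', ''].
def split_interface_alt (interface : String) : List String :=
  let g1 := interface.toList.takeWhile (fun c => !PySem.Chars.isdigit c)
  let g2 := interface.toList.dropWhile (fun c => !PySem.Chars.isdigit c)
  match g2 with
  | [] => ["", ""]
  | _ :: _ => [String.ofList g1, String.ofList g2]

-- ===== PRECONDITION & SPEC =====
def Spec_split_interface (interface : String) (out : List String) : Prop := out = split_interface_alt interface
instance (interface : String) (out : List String) : Decidable (Spec_split_interface interface out) := by unfold Spec_split_interface; infer_instance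

-- ===== CLAIM (what is proved, stated in full; the proofs are below) =====
def Claim_equal_split_interface : Prop := ∀ (interface : String), Dom_split_interface interface → Spec_split_interface interface (split_interface interface)

-- ===== LEMMAS AND PROOFS =====

-- the first element found by find? heads the dropWhile remainder
theorem dropWhile_of_find? (p : Char → Bool) (l : List Char) (x : Char)
    (h : l.find? p = some x) :
    ∃ t, l.dropWhile (fun c => !p c) = x :: t := by
  induction l with
  | nil => simp at h
  | cons c t ih =>
    by_cases hc : p c = true
    · simp [hc] at h
      subst h
      exact ⟨t, by simp [hc]⟩
    · simp [hc] at h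
      obtain ⟨t', ht'⟩ := ih h
      exact ⟨t', by simp [hc, ht']⟩

-- str.find of the first char satisfying p lands exactly at the end of the ¬p-prefix
theorem find_singleton (p : Char → Bool) (l : List Char) (x : Char)
    (h : l.find? p = some x) :
    PySem.Chars.find l [x] = ((l.takeWhile (fun c => !p c)).length : Int) := by
  set tw := l.takeWhile (fun c => !p c) with htw
  obtain ⟨t, hdw⟩ := dropWhile_of_find? p l x h
  have hl : tw ++ x :: t = l := by rw [htw, ← hdw]; exact List.takeWhile_append_dropWhile
  have hpx : p x = true := List.find?_some h
  have htwp : ∀ c ∈ tw, p c = false := by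
    intro c hc
    have := List.mem_takeWhile_imp hc
    simpa using this
  have hinf : [x] <:+: l := ⟨tw, t, by simpa using hl⟩
  have hnn : 0 ≤ PySem.Chars.find l [x] := (PySem.Chars.find_nonneg_iff l [x]).mpr hinf
  obtain ⟨hpre, hmin⟩ := PySem.Chars.find_spec hnn
  set n := (PySem.Chars.find l [x]).toNat with hn
  have hdropk : l.drop tw.length = x :: t := by
    conv_lhs => rw [← hl]
    simp
  have hk : [x] <+: l.drop tw.length := by rw [hdropk]; exact ⟨t, rfl⟩
  have h1 : n ≤ tw.length := by
    by_contra hlt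
    exact hmin tw.length (by omega) hk
  have h2 : ¬ n < tw.length := by
    intro hlt
    obtain ⟨u, hu⟩ := hpre
    have hxn : l.drop n = x :: u := hu ▸ rfl
    have hg : l[n]? = some x := by
      have := congrArg List.head? hxn
      simpa [List.head?_drop] using this
    have hq : tw[n]? = some x := by
      rw [← List.getElem?_append_left (l₂ := x :: t) hlt, hl]; exact hg
    have hxtw : x ∈ tw := List.mem_of_getElem? hq
    have := htwp x hxtw
    rw [hpx] at this; exact absurd this (by simp)
  omega

-- ===== VERDICT (by name: the statement is the Claim_ definition above) =====
theorem split_interface_spec : Claim_equal_split_interface := by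
  intro s _
  unfold Spec_split_interface split_interface split_interface_alt
  cases h : s.toList.find? (fun x => PySem.Chars.isdigit x) with
  | none =>
    have hdw : s.toList.dropWhile (fun c => !PySem.Chars.isdigit c) = [] := by
      rw [List.dropWhile_eq_nil_iff]
      intro c hc
      simpa using List.find?_eq_none.mp h c hc
    simp [hdw]
  | some x =>
    obtain ⟨t, hdw⟩ := dropWhile_of_find? (fun c => PySem.Chars.isdigit c) s.toList x h
    have hfind := find_singleton (fun c => PySem.Chars.isdigit c) s.toList x h
    have hl : s.toList.takeWhile (fun c => !PySem.Chars.isdigit c) ++ x :: t = s.toList := by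
      rw [← hdw]; exact List.takeWhile_append_dropWhile
    generalize htw : s.toList.takeWhile (fun c => !PySem.Chars.isdigit c) = tw at hfind hl hdw
    have htake : s.toList.take tw.length = tw := by
      conv_lhs => rw [← hl]
      simp
    have hdrop : s.toList.drop tw.length = x :: t := by
      conv_lhs => rw [← hl]
      simp
    have e1 : PySem.Str.slice s none (some ((tw.length : Nat) : Int)) = String.ofList (s.toList.take tw.length) := by
      apply String.toList_inj.mp
      simp [PySem.List.slice_to_natCast]
    have e2 : PySem.Str.slice s (some ((tw.length : Nat) : Int)) none = String.ofList (s.toList.drop tw.length) := by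
      apply String.toList_inj.mp
      simp [PySem.List.slice_from_natCast]
    simp [hfind, e1, e2, htake, hdrop, hdw]
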